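-- pv_equiv track=rewrite | github.com/mauhirt/bond-screenshots | populate_excel_v4.py | extract_fin_typ_from_merged
-- ===== SOURCE A (Python) =====
-- FIN_TYP_PATTERNS = [
--     'NEW MONEY', 'NEH MONEY', 'NEH MNEY', 'NEH HANEY', 'NEH HANCY',
--     'NEH HMEY', 'NEH HONEY', 'NEW HONEY', 'REH MONEY', 'REW MONEY',
--     'REF MONEY', 'NEH MONEY..', 'REFUNDING', 'REFINANCING', 'REFINANC',
--     'REFINANC.', 'REFINANC..', 'REFIN&MNG', 'REFINMNG', 'REFINCING',
--     'REFINANG', 'REFINIDG', 'REFUNDING..', 'REV',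
-- ]
--
-- def extract_fin_typ_from_merged(val):
--     v = val.strip()
--     for pat in sorted(FIN_TYP_PATTERNS, key=len, reverse=True):
--         idx = v.upper().find(pat.upper())
--         if idx > 0:
--             before = v[:idx].rstrip(' -')
--             after = v[idx:]
--             if any(kw in before.upper() for kw in ['TAX', 'FED', 'AMT', 'EXEMPT', 'EXMPT', 'ST']):
--                 return before, after
--     return val, None
-- ===== SOURCE B (Python) =====
-- FIN_TYP_PATTERNS = [
--     'NEW MONEY', 'NEH MONEY', 'NEH MNEY', 'NEH HANEY', 'NEH HANCY',
--     'NEH HMEY', 'NEH HONEY', 'NEW HONEY', 'REH MONEY', 'REW MONEY',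
--     'REF MONEY', 'NEH MONEY..', 'REFUNDING', 'REFINANCING', 'REFINANC',
--     'REFINANC.', 'REFINANC..', 'REFIN&MNG', 'REFINMNG', 'REFINCING',
--     'REFINANG', 'REFINIDG', 'REFUNDING..', 'REV',
-- ]
--
-- KEYWORDS = ('TAX', 'FED', 'AMT', 'EXEMPT', 'EXMPT', 'ST')
--
-- def extract_fin_typ_from_merged(val):
--     # One pass in original order, no sorting: keep the best qualifying
--     # candidate (longest pattern; strictly-greater updates in original order
--     # break ties by earliest position, exactly as the stable sort would).
--     v = val.strip()
--     vu = v.upper()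
--     best = None  # (len(pat), before, after)
--     for pat in FIN_TYP_PATTERNS:
--         idx = vu.find(pat.upper())
--         if idx <= 0:
--             continue
--         before = v[:idx].rstrip(' -')
--         if not any(kw in before.upper() for kw in KEYWORDS):
--             continue
--         if best is None or len(pat) > best[0]:
--             best = (len(pat), before, v[idx:])
--     if best is None:
--         return val, None
--     return best[1], best[2]
-- ===== Notes on version B (the rewrite author's own statement) =====
-- stated objective: simpler
-- what changed: Replaces A's per-call stable sort of the pattern list and sorted early-return loop with a single pass over the patterns in original order that keeps the best qualifying candidate (longest pattern, strictly-greater update so ties keep the earliest original position).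
import Mathlib
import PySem

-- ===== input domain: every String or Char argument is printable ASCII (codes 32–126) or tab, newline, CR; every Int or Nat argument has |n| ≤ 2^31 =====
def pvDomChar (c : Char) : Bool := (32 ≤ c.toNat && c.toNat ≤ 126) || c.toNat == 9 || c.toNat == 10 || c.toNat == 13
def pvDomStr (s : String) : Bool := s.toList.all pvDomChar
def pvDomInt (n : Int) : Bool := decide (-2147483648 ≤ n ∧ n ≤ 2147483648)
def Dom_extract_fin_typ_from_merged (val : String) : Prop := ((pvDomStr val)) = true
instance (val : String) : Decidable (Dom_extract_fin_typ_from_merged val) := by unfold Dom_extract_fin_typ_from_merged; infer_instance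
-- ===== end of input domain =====

-- B replaces A's per-call re-sort and sorted early-return by a single pass over the
-- patterns in original order that keeps the best qualifying candidate (simpler decomposition).

-- shared module constants and subexpressions (identical text in both Pythons)
def pvPatterns : List String := [
  "NEW MONEY", "NEH MONEY", "NEH MNEY", "NEH HANEY", "NEH HANCY",
  "NEH HMEY", "NEH HONEY", "NEW HONEY", "REH MONEY", "REW MONEY",
  "REF MONEY", "NEH MONEY..", "REFUNDING", "REFINANCING", "REFINANC",
  "REFINANC.", "REFINANC..", "REFIN&MNG", "REFINMNG", "REFINCING",
  "REFINANG", "REFINIDG", "REFUNDING..", "REV"]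

def pvKeywords : List String := ["TAX", "FED", "AMT", "EXEMPT", "EXMPT", "ST"]

-- hand port of s.rstrip(' -'): drop ' ' and '-' from the right; exact for every string
def pvRstripSpDash (s : List Char) : List Char :=
  (s.reverse.dropWhile (fun c => c == ' ' || c == '-')).reverse

-- any(kw in before.upper() for kw in [...])
def pvHasKw (before : List Char) : Bool :=
  pvKeywords.any (fun kw => PySem.Chars.isIn kw.toList (PySem.Chars.upper before))

-- ===== PORT A =====
def pvLoopA (val : String) (v : List Char) : List String → String × Option String
  | [] => (val, none)
  | pat :: rest =>
    let idx := PySem.Chars.find (PySem.Chars.upper v) (PySem.Chars.upper pat.toList)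
    if 0 < idx then
      let before := pvRstripSpDash (PySem.Chars.slice v none (some idx))
      let after := PySem.Chars.slice v (some idx) none
      if pvHasKw before then (String.ofList before, some (String.ofList after))
      else pvLoopA val v rest
    else pvLoopA val v rest

def extract_fin_typ_from_merged (val : String) : String × Option String :=
  let v := PySem.Chars.strip val.toList
  pvLoopA val v (PySem.List.sorted pvPatterns (fun p => PySem.Str.len p) true)

-- ===== PORT B =====
def pvStepB (v : List Char) (best : Option (Int × List Char × List Char)) (pat : String) :
    Option (Int × List Char × List Char) :=
  let idx := PySem.Chars.find (PySem.Chars.upper v) (PySem.Chars.upper pat.toList)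
  if idx ≤ 0 then best
  else
    let before := pvRstripSpDash (PySem.Chars.slice v none (some idx))
    if !pvHasKw before then best
    else
      match best with
      | none => some (PySem.Str.len pat, before, PySem.Chars.slice v (some idx) none)
      | some b =>
        if b.1 < PySem.Str.len pat then
          some (PySem.Str.len pat, before, PySem.Chars.slice v (some idx) none)
        else best

def extract_fin_typ_from_merged_alt (val : String) : String × Option String :=
  let v := PySem.Chars.strip val.toList
  match pvPatterns.foldl (pvStepB v) none with
  | none => (val, none)
  | some b => (String.ofList b.2.1, some (String.ofList b.2.2))

-- ===== PRECONDITION & SPEC =====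
def Spec_extract_fin_typ_from_merged (val : String) (out : String × Option String) : Prop := out = extract_fin_typ_from_merged_alt val
instance (val : String) (out : String × Option String) : Decidable (Spec_extract_fin_typ_from_merged val out) := by unfold Spec_extract_fin_typ_from_merged; infer_instance

-- ===== CLAIM (what is proved, stated in full; the proofs are below) =====
def Claim_equal_extract_fin_typ_from_merged : Prop := ∀ (val : String), Dom_extract_fin_typ_from_merged val → Spec_extract_fin_typ_from_merged val (extract_fin_typ_from_merged val)

-- ===== LEMMAS AND PROOFS =====

-- the qualifying test both programs apply to a pattern, as a predicate
def pvQ (v : List Char) (pat : String) : Bool :=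
  decide (0 < PySem.Chars.find (PySem.Chars.upper v) (PySem.Chars.upper pat.toList)) &&
    pvHasKw (pvRstripSpDash (PySem.List.slice v none
      (some (PySem.Chars.find (PySem.Chars.upper v) (PySem.Chars.upper pat.toList)))))

-- B's fold with the pattern itself as state
def pvStepX (v : List Char) (b : Option String) (pat : String) : Option String :=
  if pvQ v pat then
    match b with
    | none => some pat
    | some y => if (y.length : Int) < (pat.length : Int) then some pat else b
  else b

def pvOut (val : String) (v : List Char) : Option String → String × Option String
  | none => (val, none)
  | some pat =>
    (String.ofList (pvRstripSpDash (PySem.List.slice v none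
        (some (PySem.Chars.find (PySem.Chars.upper v) (PySem.Chars.upper pat.toList))))),
      some (String.ofList (PySem.List.slice v
        (some (PySem.Chars.find (PySem.Chars.upper v) (PySem.Chars.upper pat.toList))) none)))

def pvTriple (v : List Char) (pat : String) : Int × List Char × List Char :=
  ((pat.length : Int),
    pvRstripSpDash (PySem.List.slice v none
      (some (PySem.Chars.find (PySem.Chars.upper v) (PySem.Chars.upper pat.toList)))),
    PySem.List.slice v
      (some (PySem.Chars.find (PySem.Chars.upper v) (PySem.Chars.upper pat.toList))) none)

-- A's early-return loop is "first qualifying pattern"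
theorem pvLoopA_eq_find (val : String) (v : List Char) (l : List String) :
    pvLoopA val v l = pvOut val v (l.find? (pvQ v)) := by
  induction l with
  | nil => rfl
  | cons pat rest ih =>
    by_cases h1 : 0 < PySem.Chars.find (PySem.Chars.upper v) (PySem.Chars.upper pat.toList)
    · by_cases h2 : pvHasKw (pvRstripSpDash (PySem.List.slice v none
        (some (PySem.Chars.find (PySem.Chars.upper v) (PySem.Chars.upper pat.toList)))))
      · have hq : pvQ v pat = true := by simp [pvQ, h1, h2]
        rw [List.find?_cons_of_pos hq]
        simp [pvLoopA, h1, h2, pvOut]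
      · have hq : pvQ v pat = false := by simp [pvQ, h2]
        rw [List.find?_cons_of_neg (by simp [hq])]
        simp [pvLoopA, h1, h2, ih]
    · have hq : pvQ v pat = false := by simp [pvQ, h1]
      rw [List.find?_cons_of_neg (by simp [hq])]
      simp [pvLoopA, h1, ih]

-- B's fold tracks the same selection with the triple replaced by the pattern
theorem pvFoldB_eq_foldX (v : List Char) (l : List String) (b : Option String) :
    l.foldl (pvStepB v) (b.map (pvTriple v)) = (l.foldl (pvStepX v) b).map (pvTriple v) := by
  induction l generalizing b with
  | nil => rfl
  | cons pat rest ih =>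
    have hstep : pvStepB v (b.map (pvTriple v)) pat = (pvStepX v b pat).map (pvTriple v) := by
      by_cases h1 : 0 < PySem.Chars.find (PySem.Chars.upper v) (PySem.Chars.upper pat.toList)
      · have h1' : ¬ PySem.Chars.find (PySem.Chars.upper v) (PySem.Chars.upper pat.toList) ≤ 0 :=
          not_le.mpr h1
        by_cases h2 : pvHasKw (pvRstripSpDash (PySem.List.slice v none
          (some (PySem.Chars.find (PySem.Chars.upper v) (PySem.Chars.upper pat.toList)))))
        · cases b with
          | none => simp [pvStepB, pvStepX, pvQ, h1, h1', h2, pvTriple]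
          | some y =>
            by_cases h3 : (y.length : Int) < (pat.length : Int) <;>
              simp [pvStepB, pvStepX, pvQ, h1, h1', h2, h3, pvTriple]
        · cases b <;> simp [pvStepB, pvStepX, pvQ, h1, h1', h2, pvTriple]
      · have h1' : PySem.Chars.find (PySem.Chars.upper v) (PySem.Chars.upper pat.toList) ≤ 0 :=
          not_lt.mp h1
        cases b <;> simp [pvStepB, pvStepX, pvQ, h1, h1', pvTriple]
    simp only [List.foldl_cons, hstep, ih]

-- inserting x into a descending-by-key list commutes with "first qualifying" as a max update
theorem pvFind_insertBy (key : String → Int) (q : String → Bool) (x : String) (s : List String)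
    (hs : s.Pairwise (fun a b => key b ≤ key a)) :
    (PySem.List.insertBy (fun a b => decide (key b < key a)) x s).find? q =
      (if q x then
        match s.find? q with
        | none => some x
        | some y => if key y < key x then some x else some y
      else s.find? q) := by
  induction s with
  | nil =>
    by_cases hx : q x <;> simp [PySem.List.insertBy, List.find?, hx]
  | cons y ys ih =>
    rw [List.pairwise_cons] at hs
    by_cases hxy : key y < key x
    · have hins : PySem.List.insertBy (fun a b => decide (key b < key a)) x (y :: ys) =
        x :: y :: ys := by simp [PySem.List.insertBy, hxy]
      rw [hins]
      by_cases hx : q x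
      · rw [List.find?_cons_of_pos hx]
        cases hfind : List.find? q (y :: ys) with
        | none => simp [hx]
        | some z =>
          have hz : z ∈ y :: ys := List.mem_of_find?_eq_some hfind
          have hkz : key z ≤ key y := by
            rcases List.mem_cons.mp hz with h | h
            · exact le_of_eq (by rw [h])
            · exact hs.1 z h
          simp [hx, lt_of_le_of_lt hkz hxy]
      · rw [List.find?_cons_of_neg (by simp [hx])]
        simp [hx]
    · have hins : PySem.List.insertBy (fun a b => decide (key b < key a)) x (y :: ys) =
        y :: PySem.List.insertBy (fun a b => decide (key b < key a)) x ys := by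
        simp [PySem.List.insertBy, hxy]
      rw [hins]
      by_cases hy : q y
      · rw [List.find?_cons_of_pos hy, List.find?_cons_of_pos hy]
        by_cases hx : q x <;> simp [hx, hxy]
      · rw [List.find?_cons_of_neg (by simp [hy]), List.find?_cons_of_neg (by simp [hy]),
          ih hs.2]

-- the stable length-descending sort's first qualifying element is B's fold result
theorem pvFind_sorted_eq_foldX (v : List Char) (l : List String) :
    (PySem.List.sorted l (fun p => PySem.Str.len p) true).find? (pvQ v) =
      l.foldl (pvStepX v) none := by
  induction l using List.reverseRecOn with
  | nil => rfl
  | append_singleton l x ih =>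
    have hsort : PySem.List.sorted (l ++ [x]) (fun p => PySem.Str.len p) true =
        PySem.List.insertBy (fun a b => decide (PySem.Str.len b < PySem.Str.len a)) x
          (PySem.List.sorted l (fun p => PySem.Str.len p) true) := by
      rw [PySem.List.sorted_rev_eq_foldl_insertBy, PySem.List.sorted_rev_eq_foldl_insertBy,
        List.foldl_append]
      rfl
    rw [hsort, pvFind_insertBy (fun p => PySem.Str.len p) (pvQ v) x _
      (PySem.List.sorted_pairwise_rev l (fun p => PySem.Str.len p)), ih, List.foldl_append]
    have hlen : ∀ a b : String, (PySem.Str.len a < PySem.Str.len b) = ((a.length : Int) < (b.length : Int)) := by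
      intro a b; simp [PySem.Str.len_eq]
    cases hfold : l.foldl (pvStepX v) none with
    | none => by_cases hx : pvQ v x <;> simp [pvStepX, hx]
    | some y =>
      by_cases hx : pvQ v x
      · by_cases h3 : (y.length : Int) < (x.length : Int) <;>
          simp [pvStepX, hx, h3, PySem.Str.len_eq]
      · simp [pvStepX, hx]

-- ===== VERDICT (by name: the statement is the Claim_ definition above) =====
theorem extract_fin_typ_from_merged_spec : Claim_equal_extract_fin_typ_from_merged := by
  intro val _
  unfold Spec_extract_fin_typ_from_merged extract_fin_typ_from_merged extract_fin_typ_from_merged_alt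
  show pvLoopA val (PySem.Chars.strip val.toList)
      (PySem.List.sorted pvPatterns (fun p => PySem.Str.len p) true) =
    (match pvPatterns.foldl (pvStepB (PySem.Chars.strip val.toList)) none with
      | none => (val, none)
      | some b => (String.ofList b.2.1, some (String.ofList b.2.2)))
  rw [pvLoopA_eq_find, pvFind_sorted_eq_foldX]
  have h := pvFoldB_eq_foldX (PySem.Chars.strip val.toList) pvPatterns none
  simp only [Option.map_none] at h
  rw [h]
  cases pvPatterns.foldl (pvStepX (PySem.Chars.strip val.toList)) none with
  | none => rfl
  | some p => rfl
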